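-- pv_equiv track=rewrite | github.com/Samenergy/classification-model | data_processor.py | _suggest_column_mappings
-- ===== SOURCE A (Python) =====
-- from typing import List, Dict, Any, Optional
--
-- def _suggest_column_mappings(available_columns: List[str], missing_columns: List[str]) -> Dict[str, str]:
--     """Suggest column mappings based on available columns"""
--     suggestions = {}
--
--     column_mappings = {
--         'title': ['headline', 'article_title', 'subject', 'name'],
--         'content': ['text', 'body', 'description', 'article_content', 'summary'],
--         'id': ['article_id', 'identifier', 'index'],
--         'url': ['link', 'web_url', 'article_url'],
--         'source': ['publication', 'publisher', 'site'],
--         'published_date': ['date', 'timestamp', 'created', 'published'],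
--         'created_at': ['created', 'timestamp', 'date_added']
--     }
--
--     for missing_col in missing_columns:
--         for available_col in available_columns:
--             available_lower = available_col.lower()
--             if available_lower in column_mappings.get(missing_col, []):
--                 suggestions[missing_col] = available_col
--                 break
--
--     return suggestions
-- ===== SOURCE B (Python) =====
-- def _suggest_column_mappings(available_columns, missing_columns):
--     """Suggest column mappings based on available columns"""
--     column_mappings = {
--         'title': ['headline', 'article_title', 'subject', 'name'],
--         'content': ['text', 'body', 'description', 'article_content', 'summary'],
--         'id': ['article_id', 'identifier', 'index'],
--         'url': ['link', 'web_url', 'article_url'],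
--         'source': ['publication', 'publisher', 'site'],
--         'published_date': ['date', 'timestamp', 'created', 'published'],
--         'created_at': ['created', 'timestamp', 'date_added'],
--     }
--
--     # Reverse index: synonym -> list of target columns it can stand in for.
--     reverse = {}
--     for target, synonyms in column_mappings.items():
--         for syn in synonyms:
--             reverse.setdefault(syn, []).append(target)
--
--     # One pass over the available columns, keeping the first hit per target.
--     found = {}
--     for available_col in available_columns:
--         for target in reverse.get(available_col.lower(), []):
--             if target in missing_columns and target not in found:
--                 found[target] = available_col
--
--     # Emit in the order the missing columns were asked for.
--     suggestions = {}
--     for missing_col in missing_columns: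
--         if missing_col in found:
--             suggestions[missing_col] = found[missing_col]
--     return suggestions
-- ===== Notes on version B (the rewrite author's own statement) =====
-- stated objective: faster
-- what changed: Replaces A's nested scan (for each missing column, rescan all available columns against its synonym list) by a reverse index synonym->targets built once, a single pass over the available columns doing one dict lookup each and recording the first hit per still-unassigned target, and an emit pass in missing-column order.
import Mathlib
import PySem

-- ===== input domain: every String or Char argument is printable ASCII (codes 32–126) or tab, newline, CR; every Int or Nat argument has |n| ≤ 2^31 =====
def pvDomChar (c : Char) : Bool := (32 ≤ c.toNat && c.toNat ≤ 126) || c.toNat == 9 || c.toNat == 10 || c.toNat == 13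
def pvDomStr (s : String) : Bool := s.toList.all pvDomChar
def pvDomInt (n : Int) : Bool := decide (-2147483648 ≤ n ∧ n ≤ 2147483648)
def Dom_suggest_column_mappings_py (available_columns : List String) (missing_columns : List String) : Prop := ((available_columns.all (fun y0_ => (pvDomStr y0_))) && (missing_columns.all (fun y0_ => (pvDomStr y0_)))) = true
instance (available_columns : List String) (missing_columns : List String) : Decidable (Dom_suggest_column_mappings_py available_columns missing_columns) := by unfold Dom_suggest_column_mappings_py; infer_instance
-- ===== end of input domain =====

-- B replaces A's nested per-missing scans by a reverse index synonym→targets built once plus a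
-- single pass over the available columns (objective: faster, measured;
-- neither version mutates its arguments).

-- ===== PORT A =====
-- the dict literal `column_mappings` (shared by both ports: B's Python writes the same literal)
def pvColumnMappings : PySem.Dict String (List String) :=
  PySem.Dict.ofList [
    ("title", ["headline", "article_title", "subject", "name"]),
    ("content", ["text", "body", "description", "article_content", "summary"]),
    ("id", ["article_id", "identifier", "index"]),
    ("url", ["link", "web_url", "article_url"]),
    ("source", ["publication", "publisher", "site"]),
    ("published_date", ["date", "timestamp", "created", "published"]),
    ("created_at", ["created", "timestamp", "date_added"])]

-- A's inner `for available_col in available_columns: … break`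
def pvScanA (suggestions : PySem.Dict String String) (missing_col : String) :
    List String → PySem.Dict String String
  | [] => suggestions
  | available_col :: rest =>
    if (pvColumnMappings.getD missing_col []).contains (PySem.Str.lower available_col) then
      suggestions.insert missing_col available_col
    else pvScanA suggestions missing_col rest

def suggest_column_mappings_py (available_columns : List String) (missing_columns : List String) :
    List (String × String) :=
  (missing_columns.foldl (fun sug m => pvScanA sug m available_columns) PySem.Dict.empty).items

-- ===== PORT B =====
-- `reverse.setdefault(syn, []).append(target)` = Dict.modify syn [] (· ++ [target]) (exact: in-place append, new keys appended)
def pvReverse : PySem.Dict String (List String) :=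
  pvColumnMappings.items.foldl
    (fun rev p => p.2.foldl (fun rev syn => rev.modify syn [] (· ++ [p.1])) rev)
    PySem.Dict.empty

-- the single pass over available_columns building `found`
def pvFound (available_columns : List String) (missing_columns : List String) :
    PySem.Dict String String :=
  available_columns.foldl
    (fun found available_col =>
      (pvReverse.getD (PySem.Str.lower available_col) []).foldl
        (fun found target =>
          if missing_columns.contains target && !found.contains target then
            found.insert target available_col
          else found)
        found)
    PySem.Dict.empty

def suggest_column_mappings_py_alt (available_columns : List String) (missing_columns : List String) :
    List (String × String) :=
  let found := pvFound available_columns missing_columns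
  -- `if missing_col in found: suggestions[missing_col] = found[missing_col]` (the lookup is guarded)
  (missing_columns.foldl
    (fun suggestions missing_col =>
      match found.get? missing_col with
      | some v => suggestions.insert missing_col v
      | none => suggestions)
    PySem.Dict.empty).items

-- ===== PRECONDITION & SPEC =====
def Spec_suggest_column_mappings_py (available_columns : List String) (missing_columns : List String) (out : List (String × String)) : Prop := out = suggest_column_mappings_py_alt available_columns missing_columns
instance (available_columns : List String) (missing_columns : List String) (out : List (String × String)) : Decidable (Spec_suggest_column_mappings_py available_columns missing_columns out) := by unfold Spec_suggest_column_mappings_py; infer_instance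

-- ===== CLAIM (what is proved, stated in full; the proofs are below) =====
def Claim_equal_suggest_column_mappings_py : Prop := ∀ (available_columns : List String) (missing_columns : List String), Dom_suggest_column_mappings_py available_columns missing_columns → Spec_suggest_column_mappings_py available_columns missing_columns (suggest_column_mappings_py available_columns missing_columns)

-- ===== LEMMAS AND PROOFS =====

-- the match condition A tests for a missing column m against an available column c
def pvCond (m c : String) : Bool :=
  (pvColumnMappings.getD m []).contains (PySem.Str.lower c)

def pvSynList : List String :=
  ["headline", "article_title", "subject", "name", "text", "body", "description",
   "article_content", "summary", "article_id", "identifier", "index", "link", "web_url",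
   "article_url", "publication", "publisher", "site", "date", "timestamp", "created",
   "published", "date_added"]

def pvKeyList : List String :=
  ["title", "content", "id", "url", "source", "published_date", "created_at"]

lemma pvReverse_getD_not_syn (s : String) (hs : s ∉ pvSynList) : pvReverse.getD s [] = [] := by
  simp [pvSynList] at hs
  obtain ⟨h1,h2,h3,h4,h5,h6,h7,h8,h9,h10,h11,h12,h13,h14,h15,h16,h17,h18,h19,h20,h21,h22,h23⟩ := hs
  simp [show pvReverse = PySem.Dict.mk [("headline", ["title"]), ("article_title", ["title"]), ("subject", ["title"]), ("name", ["title"]), ("text", ["content"]), ("body", ["content"]), ("description", ["content"]), ("article_content", ["content"]), ("summary", ["content"]), ("article_id", ["id"]), ("identifier", ["id"]), ("index", ["id"]), ("link", ["url"]), ("web_url", ["url"]), ("article_url", ["url"]), ("publication", ["source"]), ("publisher", ["source"]), ("site", ["source"]), ("date", ["published_date"]), ("timestamp", ["published_date", "created_at"]), ("created", ["published_date", "created_at"]), ("published", ["published_date"]), ("date_added", ["created_at"])] from by decide,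
    PySem.Dict.getD_eq_get?_getD, PySem.Dict.get?_mk_cons,
    Ne.symm h1, Ne.symm h2, Ne.symm h3, Ne.symm h4, Ne.symm h5, Ne.symm h6, Ne.symm h7, Ne.symm h8,
    Ne.symm h9, Ne.symm h10, Ne.symm h11, Ne.symm h12, Ne.symm h13, Ne.symm h14, Ne.symm h15,
    Ne.symm h16, Ne.symm h17, Ne.symm h18, Ne.symm h19, Ne.symm h20, Ne.symm h21, Ne.symm h22, Ne.symm h23, PySem.Dict.get?]

lemma pvColumnMappings_getD_not_key (t : String) (ht : t ∉ pvKeyList) :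
    pvColumnMappings.getD t [] = [] := by
  simp [pvKeyList] at ht
  obtain ⟨h1,h2,h3,h4,h5,h6,h7⟩ := ht
  simp [show pvColumnMappings = PySem.Dict.mk [("title", ["headline", "article_title", "subject", "name"]), ("content", ["text", "body", "description", "article_content", "summary"]), ("id", ["article_id", "identifier", "index"]), ("url", ["link", "web_url", "article_url"]), ("source", ["publication", "publisher", "site"]), ("published_date", ["date", "timestamp", "created", "published"]), ("created_at", ["created", "timestamp", "date_added"])] from by decide, PySem.Dict.getD_eq_get?_getD, PySem.Dict.get?,
    Ne.symm h1, Ne.symm h2, Ne.symm h3, Ne.symm h4, Ne.symm h5, Ne.symm h6, Ne.symm h7]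

lemma pvRev_spec (s t : String) :
    (pvReverse.getD s []).contains t = (pvColumnMappings.getD t []).contains s := by
  by_cases hs : s ∈ pvSynList
  · by_cases ht : t ∈ pvKeyList
    · fin_cases hs <;> fin_cases ht <;> decide
    · rw [pvColumnMappings_getD_not_key t ht]
      simp [pvKeyList] at ht
      fin_cases hs <;> simp_all [show pvReverse = PySem.Dict.mk [("headline", ["title"]), ("article_title", ["title"]), ("subject", ["title"]), ("name", ["title"]), ("text", ["content"]), ("body", ["content"]), ("description", ["content"]), ("article_content", ["content"]), ("summary", ["content"]), ("article_id", ["id"]), ("identifier", ["id"]), ("index", ["id"]), ("link", ["url"]), ("web_url", ["url"]), ("article_url", ["url"]), ("publication", ["source"]), ("publisher", ["source"]), ("site", ["source"]), ("date", ["published_date"]), ("timestamp", ["published_date", "created_at"]), ("created", ["published_date", "created_at"]), ("published", ["published_date"]), ("date_added", ["created_at"])] from by decide, PySem.Dict.getD_eq_get?_getD, PySem.Dict.get?]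
  · rw [pvReverse_getD_not_syn s hs]
    by_cases ht : t ∈ pvKeyList
    · simp [pvSynList] at hs
      fin_cases ht <;> simp_all [show pvColumnMappings = PySem.Dict.mk [("title", ["headline", "article_title", "subject", "name"]), ("content", ["text", "body", "description", "article_content", "summary"]), ("id", ["article_id", "identifier", "index"]), ("url", ["link", "web_url", "article_url"]), ("source", ["publication", "publisher", "site"]), ("published_date", ["date", "timestamp", "created", "published"]), ("created_at", ["created", "timestamp", "date_added"])] from by decide, PySem.Dict.getD_eq_get?_getD, PySem.Dict.get?]
    · rw [pvColumnMappings_getD_not_key t ht]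
      simp

lemma pvInner_get? (c : String) (missing : List String) (T : List String)
    (f : PySem.Dict String String) (m : String) :
    (T.foldl (fun f t => if missing.contains t && !f.contains t then f.insert t c else f) f).get? m
      = if T.contains m && missing.contains m && !f.contains m then some c else f.get? m := by
  induction T generalizing f with
  | nil => simp
  | cons t T ih =>
    simp only [List.foldl_cons]
    by_cases hc : (missing.contains t && !f.contains t) = true
    · rw [if_pos hc, ih]
      simp only [Bool.and_eq_true, Bool.not_eq_true', List.contains_eq_mem,
        decide_eq_true_eq] at hc
      by_cases htm : t = m
      · subst htm
        simp [PySem.Dict.get?_insert_self, PySem.Dict.contains_insert_self, hc.1, hc.2]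
      · have hmt : m ≠ t := fun h => htm h.symm
        simp [PySem.Dict.contains_insert, PySem.Dict.get?_insert_of_ne _ _ hmt, hmt, htm]
    · rw [if_neg hc, ih]
      simp only [Bool.and_eq_true, Bool.not_eq_true', List.contains_eq_mem,
        decide_eq_true_eq, not_and] at hc
      by_cases htm : t = m
      · subst htm
        by_cases hmm : t ∈ missing
        · have := hc hmm
          simp [hmm, this]
        · simp [hmm]
      · have hmt : m ≠ t := fun h => htm h.symm
        simp [hmt, htm]

lemma pvFound_aux_get? (missing : List String) (avail : List String)
    (f : PySem.Dict String String) (m : String) :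
    (avail.foldl
      (fun found c =>
        (pvReverse.getD (PySem.Str.lower c) []).foldl
          (fun found t => if missing.contains t && !found.contains t then found.insert t c else found)
          found) f).get? m
      = match f.get? m with
        | some v => some v
        | none => if missing.contains m then avail.find? (fun c => pvCond m c) else none := by
  induction avail generalizing f with
  | nil => cases h : f.get? m <;> simp [h]
  | cons c rest ih =>
    simp only [List.foldl_cons]
    rw [ih]
    have hstep := pvInner_get? c missing (pvReverse.getD (PySem.Str.lower c) []) f m
    rw [pvRev_spec (PySem.Str.lower c) m] at hstep
    rw [hstep]
    cases h : f.get? m with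
    | some v =>
      have hct : f.contains m = true := by rw [PySem.Dict.contains_eq_isSome_get?, h]; rfl
      simp [hct, h]
    | none =>
      have hct : f.contains m = false := by rw [PySem.Dict.contains_eq_isSome_get?, h]; rfl
      by_cases hm : m ∈ missing
      · by_cases hcnd : PySem.Str.lower c ∈ pvColumnMappings.getD m []
        · simp [List.find?_cons, pvCond, hct, hm, hcnd, h]
        · simp [List.find?_cons, pvCond, hct, hm, hcnd, h]
      · simp [hct, hm, h]

lemma pvFound_get? (avail missing : List String) (m : String) (hm : m ∈ missing) :
    (pvFound avail missing).get? m = avail.find? (fun c => pvCond m c) := by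
  unfold pvFound
  rw [pvFound_aux_get?]
  simp [hm]

lemma pvScanA_eq_find (sug : PySem.Dict String String) (m : String) (avail : List String) :
    pvScanA sug m avail
      = match avail.find? (fun c => pvCond m c) with
        | some c => sug.insert m c
        | none => sug := by
  induction avail with
  | nil => simp [pvScanA]
  | cons c rest ih =>
    by_cases hc : PySem.Str.lower c ∈ pvColumnMappings.getD m []
    · simp [pvScanA, List.find?_cons, pvCond, hc]
    · simp [pvScanA, List.find?_cons, pvCond, hc, ih]

-- A's dict fold and B's emit fold coincide pointwise on the missing columns
theorem pv_main_eq (avail missing : List String) :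
    (missing.foldl (fun sug m => pvScanA sug m avail) PySem.Dict.empty).items
      = (missing.foldl
          (fun suggestions missing_col =>
            match (pvFound avail missing).get? missing_col with
            | some v => suggestions.insert missing_col v
            | none => suggestions)
          PySem.Dict.empty).items := by
  congr 1
  apply PySem.List.foldl_congr_mem
  intro acc m hm
  rw [pvScanA_eq_find, pvFound_get? avail missing m hm]

-- ===== VERDICT (by name: the statement is the Claim_ definition above) =====
theorem suggest_column_mappings_py_spec : Claim_equal_suggest_column_mappings_py := by
  intro avail missing _
  unfold Spec_suggest_column_mappings_py suggest_column_mappings_py suggest_column_mappings_py_alt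
  exact pv_main_eq avail missing
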